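-- pv_equiv track=rewrite | github.com/filtrw/python-learn | level2_basics_and_application/namespace_variables_recursion.py | get_namespace_of_variables
-- ===== SOURCE A (Python) =====
-- def get_namespace_of_variables(current_namespace, variable, namespace_relations, namespaces_variables):
--     if (current_namespace == None):
--         return None
--
--     if (current_namespace in namespaces_variables.keys() and variable in namespaces_variables[current_namespace]):
--         return current_namespace
--
--     return get_namespace_of_variables(
--         namespace_relations.get(current_namespace),
--         variable,
--         namespace_relations,
--         namespaces_variables
--     )
-- ===== SOURCE B (Python) =====
-- def get_namespace_of_variables(current_namespace, variable, namespace_relations, namespaces_variables):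
--     # Phase 1: materialise the ancestor chain (a chain that terminates or finds the
--     # variable does so within len(namespace_relations) + 1 visited namespaces).
--     chain = []
--     ns = current_namespace
--     for _ in range(len(namespace_relations) + 1):
--         if ns is None:
--             break
--         chain.append(ns)
--         ns = namespace_relations.get(ns)
--     # Phase 2: first namespace in the chain that declares the variable.
--     for ns in chain:
--         if variable in namespaces_variables.get(ns, ()):
--             return ns
--     return None
-- ===== Notes on version B (the rewrite author's own statement) =====
-- stated objective: alternative
-- what changed: B replaces A's self-recursion, which tests each ancestor and recurses, by two independent passes: it first materialises the ancestor chain as a list, then scans that list for the first namespace declaring the variable.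
import Mathlib
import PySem

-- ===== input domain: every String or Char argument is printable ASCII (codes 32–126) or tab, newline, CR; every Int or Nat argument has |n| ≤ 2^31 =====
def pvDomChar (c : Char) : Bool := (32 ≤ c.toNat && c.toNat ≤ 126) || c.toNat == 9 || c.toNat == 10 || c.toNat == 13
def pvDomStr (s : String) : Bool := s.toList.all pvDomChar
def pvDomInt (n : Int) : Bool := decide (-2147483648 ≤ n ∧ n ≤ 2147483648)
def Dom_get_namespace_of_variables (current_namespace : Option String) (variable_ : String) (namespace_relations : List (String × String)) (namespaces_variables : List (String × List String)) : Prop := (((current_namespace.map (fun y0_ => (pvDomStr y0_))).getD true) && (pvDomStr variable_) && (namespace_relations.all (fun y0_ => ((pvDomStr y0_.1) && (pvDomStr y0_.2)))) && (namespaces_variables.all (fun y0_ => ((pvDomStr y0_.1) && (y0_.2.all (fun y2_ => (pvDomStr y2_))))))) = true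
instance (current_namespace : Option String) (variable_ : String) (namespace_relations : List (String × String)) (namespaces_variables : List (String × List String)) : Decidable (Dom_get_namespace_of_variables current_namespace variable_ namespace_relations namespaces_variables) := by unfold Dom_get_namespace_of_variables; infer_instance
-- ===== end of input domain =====

-- B materialises the ancestor chain first, then scans it for the variable; equal to A's test-and-recurse on every input on which A terminates (alternative decomposition, same cost).


-- ===== PORT A =====
-- A's unbounded self-recursion is ported with a fuel of namespace_relations.length + 1; under Pre_
-- (A's walk reaches None or a declaring namespace within that many steps) the fuel is never exhausted.
def pvAGo (variable_ : String) (nr : PySem.Dict String String) (nv : PySem.Dict String (List String)) : Nat → Option String → Option String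
  | 0, _ => none
  | fuel+1, ns =>
      match ns with
      | none => none                                     -- if current_namespace == None: return None
      | some c =>
        if nv.contains c && ((nv.get? c).getD []).contains variable_  -- current in keys() and variable in dict[current]
        then some c
        else pvAGo variable_ nr nv fuel (nr.get? c)      -- recurse on namespace_relations.get(current)

def get_namespace_of_variables (current_namespace : Option String) (variable_ : String) (namespace_relations : List (String × String)) (namespaces_variables : List (String × List String)) : Option String :=
  pvAGo variable_ (PySem.Dict.mk namespace_relations) (PySem.Dict.mk namespaces_variables) (namespace_relations.length + 1) current_namespace

-- ===== PORT B =====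
-- Phase 1 of Source B: the for-loop over range(len(namespace_relations) + 1) building `chain`.
def pvChainBuild (nr : PySem.Dict String String) : Nat → Option String → List String
  | 0, _ => []
  | _+1, none => []
  | k+1, some c => c :: pvChainBuild nr k (nr.get? c)

-- Phase 2 of Source B: first namespace in the chain that declares the variable.
def pvFirstDecl (variable_ : String) (nv : PySem.Dict String (List String)) : List String → Option String
  | [] => none
  | c :: rest => if (nv.getD c []).contains variable_ then some c else pvFirstDecl variable_ nv rest

def get_namespace_of_variables_alt (current_namespace : Option String) (variable_ : String) (namespace_relations : List (String × String)) (namespaces_variables : List (String × List String)) : Option String :=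
  pvFirstDecl variable_ (PySem.Dict.mk namespaces_variables)
    (pvChainBuild (PySem.Dict.mk namespace_relations) (namespace_relations.length + 1) current_namespace)

-- ===== PRECONDITION & SPEC =====
-- Iterating namespace_relations.get from a starting namespace (None is absorbing), for Pre_/Raises_.
def pvChase (nr : PySem.Dict String String) : Nat → Option String → Option String
  | 0, ns => ns
  | _+1, none => none
  | k+1, some c => pvChase nr k (nr.get? c)

-- The first len+1 namespaces visited along the parent walk, for Pre_/Raises_.
def pvChainPre (nr : PySem.Dict String String) : Nat → Option String → List String
  | 0, _ => []
  | _+1, none => []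
  | k+1, some c => c :: pvChainPre nr k (nr.get? c)

-- Pre_ excludes exactly the inputs on which the Python A never returns (RecursionError): those whose
-- parent walk neither reaches None nor visits a namespace declaring the variable within
-- len(namespace_relations)+1 steps (a bound within which every reachable namespace appears).
def Pre_get_namespace_of_variables (current_namespace : Option String) (variable_ : String) (namespace_relations : List (String × String)) (namespaces_variables : List (String × List String)) : Prop :=
  pvChase (PySem.Dict.mk namespace_relations) (namespace_relations.length + 1) current_namespace = none ∨
  (pvChainPre (PySem.Dict.mk namespace_relations) (namespace_relations.length + 1) current_namespace).any
    (fun c => ((PySem.Dict.mk namespaces_variables).getD c []).contains variable_) = true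
instance (current_namespace : Option String) (variable_ : String) (namespace_relations : List (String × String)) (namespaces_variables : List (String × List String)) : Decidable (Pre_get_namespace_of_variables current_namespace variable_ namespace_relations namespaces_variables) := by unfold Pre_get_namespace_of_variables; infer_instance

def pvWitness_get_namespace_of_variables : Option String × String × (List (String × String)) × (List (String × List String)) :=
  (some "a", "x", [("a", "root")], [("root", ["x", "y"])])

def Spec_get_namespace_of_variables (current_namespace : Option String) (variable_ : String) (namespace_relations : List (String × String)) (namespaces_variables : List (String × List String)) (out : Option String) : Prop := out = get_namespace_of_variables_alt current_namespace variable_ namespace_relations namespaces_variables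
instance (current_namespace : Option String) (variable_ : String) (namespace_relations : List (String × String)) (namespaces_variables : List (String × List String)) (out : Option String) : Decidable (Spec_get_namespace_of_variables current_namespace variable_ namespace_relations namespaces_variables out) := by unfold Spec_get_namespace_of_variables; infer_instance

-- ===== CLAIM (what is proved, stated in full; the proofs are below) =====
def Claim_equal_get_namespace_of_variables : Prop := ∀ (current_namespace : Option String) (variable_ : String) (namespace_relations : List (String × String)) (namespaces_variables : List (String × List String)), Dom_get_namespace_of_variables current_namespace variable_ namespace_relations namespaces_variables → Pre_get_namespace_of_variables current_namespace variable_ namespace_relations namespaces_variables → Spec_get_namespace_of_variables current_namespace variable_ namespace_relations namespaces_variables (get_namespace_of_variables current_namespace variable_ namespace_relations namespaces_variables)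

-- ===== LEMMAS AND PROOFS =====
-- A's per-node test equals B's: membership in the default-[] lookup.
theorem pvCond_eq (variable_ c : String) (nv : PySem.Dict String (List String)) :
    (nv.contains c && ((nv.get? c).getD []).contains variable_) = (nv.getD c []).contains variable_ := by
  rw [PySem.Dict.contains_eq_isSome_get?]
  simp [PySem.Dict.getD]
  cases nv.get? c <;> simp

-- With the same fuel, A's test-and-recurse equals scanning the materialised chain.
theorem pvAGo_eq_scan (variable_ : String) (nr : PySem.Dict String String) (nv : PySem.Dict String (List String)) :
    ∀ (m : Nat) (ns : Option String),
      pvAGo variable_ nr nv m ns = pvFirstDecl variable_ nv (pvChainBuild nr m ns) := by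
  intro m
  induction m with
  | zero => intro ns; simp [pvAGo, pvChainBuild, pvFirstDecl]
  | succ k ih =>
      intro ns
      cases ns with
      | none => simp [pvAGo, pvChainBuild, pvFirstDecl]
      | some c =>
          simp only [pvAGo, pvChainBuild, pvFirstDecl, pvCond_eq]
          split <;> simp [ih]

-- ===== VERDICT (by name: the statement is the Claim_ definition above) =====
theorem get_namespace_of_variables_spec : Claim_equal_get_namespace_of_variables := by
  intro cn v nr nv _ _
  unfold Spec_get_namespace_of_variables get_namespace_of_variables get_namespace_of_variables_alt
  exact pvAGo_eq_scan v (PySem.Dict.mk nr) (PySem.Dict.mk nv) (nr.length + 1) cn
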